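-- pv_equiv track=rewrite | github.com/avephill/chords-db | scripts/add-scales-barres-capo-a.py | barre_fret_for_chart
-- ===== SOURCE A (Python) =====
-- def min_positive_fret(db_frets: str) -> int | None:
--     vals = []
--     for ch in db_frets:
--         if ch == "x":
--             continue
--         n = int(ch, 16)
--         if n > 0:
--             vals.append(n)
--     return min(vals) if vals else None
--
-- def barre_fret_for_chart(frets: str) -> int | None:
--     """Fret index for a barre when the diagram shows one (prefer duplicated fret values)."""
--     from collections import Counter
--
--     vals = [int(ch, 16) for ch in frets if ch != "x"]
--     if not vals:
--         return None
--     c = Counter(vals)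
--     dups = [v for v, n in c.items() if n >= 2]
--     if dups:
--         return min(dups)
--     return min_positive_fret(frets)
-- ===== SOURCE B (Python) =====
-- def barre_fret_for_chart(frets: str) -> int | None:
--     """Fret index for a barre when the diagram shows one (prefer duplicated fret values)."""
--     vals = sorted(int(ch, 16) for ch in frets if ch != "x")
--     if not vals:
--         return None
--     for i in range(1, len(vals)):
--         if vals[i] == vals[i - 1]:
--             return vals[i]  # smallest duplicated fret (list is sorted)
--     for v in vals:
--         if v > 0:
--             return v  # smallest positive fret
--     return None
-- ===== Notes on version B (the rewrite author's own statement) =====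
-- stated objective: simpler
-- what changed: Replaces the Counter/dups-filter plus the separate min_positive_fret helper with one sort of the parsed frets followed by two linear scans: the first adjacent-equal pair gives the minimum duplicate, otherwise the first positive value is the minimum positive fret.
import Mathlib
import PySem

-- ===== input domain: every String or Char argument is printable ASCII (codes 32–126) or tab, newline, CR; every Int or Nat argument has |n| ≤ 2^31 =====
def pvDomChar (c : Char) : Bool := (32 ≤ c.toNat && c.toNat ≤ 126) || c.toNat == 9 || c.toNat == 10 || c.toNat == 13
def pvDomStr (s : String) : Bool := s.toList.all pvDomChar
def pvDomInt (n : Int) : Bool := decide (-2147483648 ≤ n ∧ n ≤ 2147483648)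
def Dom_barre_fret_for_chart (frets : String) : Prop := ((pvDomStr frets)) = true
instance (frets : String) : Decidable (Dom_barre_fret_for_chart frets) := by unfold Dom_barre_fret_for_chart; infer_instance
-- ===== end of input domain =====

-- B replaces the Counter/dups filter and the min_positive_fret helper by a single sort of the
-- parsed frets followed by two linear scans (first adjacent duplicate, else first positive): simpler.

-- int(ch, 16) for the single hex-digit characters admitted by Pre_ (exact there)
def pvHexVal (c : Char) : Int :=
  if '0' ≤ c ∧ c ≤ '9' then (c.toNat : Int) - 48
  else if 'a' ≤ c ∧ c ≤ 'f' then (c.toNat : Int) - 87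
  else if 'A' ≤ c ∧ c ≤ 'F' then (c.toNat : Int) - 55
  else 0

-- ===== PORT A =====
def pv_min_positive_fret (db_frets : String) : Option Int :=
  let vals := db_frets.toList.foldl
    (fun acc ch =>
      if ch = 'x' then acc
      else
        let n := pvHexVal ch
        if n > 0 then acc ++ [n] else acc) []
  if vals = [] then none else PySem.List.min? vals (fun v => v)

def barre_fret_for_chart (frets : String) : Option Int :=
  let vals := (frets.toList.filter (fun ch => !(ch == 'x'))).map pvHexVal
  if vals = [] then none
  else
    let c := PySem.Dict.counter vals
    let dups := (c.items.filter (fun p => decide (p.2 ≥ 2))).map (fun p => p.1)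
    if dups = [] then pv_min_positive_fret frets
    else PySem.List.min? dups (fun v => v)

-- ===== PORT B =====
-- scan of 'for i in range(1, len(vals)): if vals[i] == vals[i-1]' as recursion over adjacent pairs
def pvFirstAdjDup : List Int → Option Int
  | a :: b :: t => if a = b then some b else pvFirstAdjDup (b :: t)
  | _ => none

def pvFirstPos : List Int → Option Int
  | [] => none
  | v :: t => if v > 0 then some v else pvFirstPos t

def barre_fret_for_chart_alt (frets : String) : Option Int :=
  let vals := PySem.List.sorted ((frets.toList.filter (fun ch => !(ch == 'x'))).map pvHexVal)
      (fun v => v) false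
  if vals = [] then none
  else
    match pvFirstAdjDup vals with
    | some d => some d
    | none => pvFirstPos vals

-- ===== PRECONDITION & SPEC =====
-- Pre_: every character is a hexadecimal digit or the lower-case mute marker letter x; on any other character int(ch, 16) raises ValueError in both programs.
def Pre_barre_fret_for_chart (frets : String) : Prop :=
  frets.toList.all (fun c =>
    c == 'x' || (('0' ≤ c && c ≤ '9') || ('a' ≤ c && c ≤ 'f') || ('A' ≤ c && c ≤ 'F'))) = true
instance (frets : String) : Decidable (Pre_barre_fret_for_chart frets) := by
  unfold Pre_barre_fret_for_chart; infer_instance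
def pvWitness_barre_fret_for_chart : String := "x32010"

def Spec_barre_fret_for_chart (frets : String) (out : Option Int) : Prop := out = barre_fret_for_chart_alt frets
instance (frets : String) (out : Option Int) : Decidable (Spec_barre_fret_for_chart frets out) := by unfold Spec_barre_fret_for_chart; infer_instance

-- ===== CLAIM (what is proved, stated in full; the proofs are below) =====
def Claim_equal_barre_fret_for_chart : Prop := ∀ (frets : String), Dom_barre_fret_for_chart frets → Pre_barre_fret_for_chart frets → Spec_barre_fret_for_chart frets (barre_fret_for_chart frets)

-- ===== LEMMAS AND PROOFS =====

-- min(xs) with the id key is any member that is a lower bound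
theorem pv_foldl_min_eq {m x : Int} {t : List Int} (hm : m = x ∨ m ∈ t)
    (h : m ≤ x ∧ ∀ y ∈ t, m ≤ y) : t.foldl min x = m := by
  induction t generalizing x with
  | nil => simp only [List.foldl_nil]; simp at hm; omega
  | cons a t ih =>
    simp only [List.foldl_cons]
    apply ih
    · rcases hm with hm | hm
      · exact Or.inl (by subst hm; exact (min_eq_left (h.2 a (by simp))).symm)
      · rcases (List.mem_cons.mp hm) with hm | hm
        · exact Or.inl (by subst hm; exact (min_eq_right h.1).symm)
        · exact Or.inr hm
    · exact ⟨le_min h.1 (h.2 a (by simp)), fun y hy => h.2 y (by simp [hy])⟩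

theorem pv_min?_id_of_isMin {m : Int} {xs : List Int} (hm : m ∈ xs)
    (h : ∀ y ∈ xs, m ≤ y) : PySem.List.min? xs (fun v => v) = some m := by
  cases xs with
  | nil => simp at hm
  | cons x t =>
    rw [PySem.List.min?_id_cons]
    have : t.foldl min x = m :=
      pv_foldl_min_eq (by simpa using hm) ⟨h x (by simp), fun y hy => h y (by simp [hy])⟩
    rw [this]

theorem pv_min?_id_eq_of_perm {xs ys : List Int} (h : xs.Perm ys) :
    PySem.List.min? xs (fun v => v) = PySem.List.min? ys (fun v => v) := by
  cases hx : PySem.List.min? xs (fun v => v) with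
  | none =>
    have := (PySem.List.min?_eq_none_iff (xs := xs) (key := fun v => v)).mp hx
    subst this
    have hys : ys = [] := h.nil_eq.symm
    simp [hys, PySem.List.min?]
  | some m =>
    have hmem := PySem.List.min?_mem hx
    have hmin := PySem.List.min?_isMin hx
    exact (pv_min?_id_of_isMin (h.mem_iff.mp hmem) (fun y hy => hmin y (h.mem_iff.mpr hy))).symm

-- first adjacent duplicate in a ≤-sorted list: none ↔ nodup
theorem pv_firstAdjDup_none {S : List Int} (hp : S.Pairwise (· ≤ ·)) :
    pvFirstAdjDup S = none ↔ S.Nodup := by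
  induction S with
  | nil => simp [pvFirstAdjDup]
  | cons a t ih =>
    cases t with
    | nil => simp [pvFirstAdjDup]
    | cons b t' =>
      by_cases hab : a = b
      · subst hab
        simp [pvFirstAdjDup, List.nodup_cons]
      · have hp' : (b :: t').Pairwise (· ≤ ·) := hp.tail
        have hale : ∀ y ∈ b :: t', a ≤ y := fun y hy => (List.pairwise_cons.mp hp).1 y hy
        have halt : ∀ y ∈ b :: t', a < y := by
          intro y hy
          rcases List.mem_cons.mp hy with rfl | hy'
          · exact lt_of_le_of_ne (hale y (by simp)) hab
          · have hb := (List.pairwise_cons.mp hp').1 y hy'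
            have := hale b (by simp)
            exact lt_of_lt_of_le (lt_of_le_of_ne this hab) hb
        rw [show pvFirstAdjDup (a :: b :: t') = pvFirstAdjDup (b :: t') by simp [pvFirstAdjDup, hab]]
        rw [ih hp']
        simp only [List.nodup_cons]
        constructor
        · intro hh
          exact ⟨fun hmem => absurd rfl (ne_of_lt (halt a hmem)), hh⟩
        · intro hh
          exact hh.2

-- first adjacent duplicate in a ≤-sorted list is the minimum duplicated value
theorem pv_firstAdjDup_some {S : List Int} {d : Int} (hp : S.Pairwise (· ≤ ·))
    (h : pvFirstAdjDup S = some d) :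
    2 ≤ S.count d ∧ ∀ v : Int, 2 ≤ S.count v → d ≤ v := by
  induction S with
  | nil => simp [pvFirstAdjDup] at h
  | cons a t ih =>
    cases t with
    | nil => simp [pvFirstAdjDup] at h
    | cons b t' =>
      have hale : ∀ y ∈ b :: t', a ≤ y := fun y hy => (List.pairwise_cons.mp hp).1 y hy
      by_cases hab : a = b
      · have hd : b = d := by simpa [pvFirstAdjDup, hab] using h
        subst hd
        subst hab
        constructor
        · rw [List.count_cons_self, List.count_cons_self]; omega
        · intro v hv
          have hvmem : v ∈ a :: a :: t' := List.count_pos_iff.mp (by omega)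
          rcases List.mem_cons.mp hvmem with rfl | hv'
          · exact le_refl _
          · exact hale v hv' 
      · have h' : pvFirstAdjDup (b :: t') = some d := by simpa [pvFirstAdjDup, hab] using h
        have halt : ∀ y ∈ b :: t', a < y := by
          intro y hy
          rcases List.mem_cons.mp hy with rfl | hy'
          · exact lt_of_le_of_ne (hale y (by simp)) hab
          · have hb := (List.pairwise_cons.mp hp.tail).1 y hy'
            exact lt_of_lt_of_le (lt_of_le_of_ne (hale b (by simp)) hab) hb
        obtain ⟨hc, hmin⟩ := ih hp.tail h'
        have hdmem : d ∈ b :: t' := List.count_pos_iff.mp (by omega)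
        have hda : a ≠ d := ne_of_lt (halt d hdmem)
        constructor
        · rw [List.count_cons]
          simp [hda]; omega
        · intro v hv
          by_cases hva : v = a
          · subst hva
            have hvin : (b :: t').count v = 0 := by
              by_contra hne
              exact absurd rfl (ne_of_lt (halt v (List.count_pos_iff.mp (Nat.pos_of_ne_zero hne))))
            rw [List.count_cons, hvin] at hv
            simp at hv
          · have hav : ¬ a = v := fun hh => hva hh.symm
            apply hmin
            rw [List.count_cons] at hv
            simpa [hav] using hv

-- first positive in a ≤-sorted list is min of the positives
theorem pv_firstPos_eq {S : List Int} (hp : S.Pairwise (· ≤ ·)) :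
    pvFirstPos S = PySem.List.min? (S.filter (fun v => decide (0 < v))) (fun v => v) := by
  induction S with
  | nil => simp [pvFirstPos, PySem.List.min?]
  | cons a t ih =>
    by_cases ha : 0 < a
    · have hfa : (a :: t).filter (fun v => decide (0 < v)) = a :: t.filter (fun v => decide (0 < v)) := by
        simp [ha]
      rw [hfa]
      have : PySem.List.min? (a :: t.filter (fun v => decide (0 < v))) (fun v => v) = some a := by
        apply pv_min?_id_of_isMin (by simp)
        intro y hy
        rcases List.mem_cons.mp hy with rfl | hy'
        · rfl
        · exact (List.pairwise_cons.mp hp).1 y (List.mem_of_mem_filter hy')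
      rw [this]
      simp [pvFirstPos, ha]
    · have hfa : (a :: t).filter (fun v => decide (0 < v)) = t.filter (fun v => decide (0 < v)) := by
        simp [ha]
      rw [hfa, ← ih hp.tail]
      simp [pvFirstPos, ha]

-- the dups list of port A, rewritten through items_counter
theorem pv_dups_eq (L : List Int) :
    (((PySem.Dict.counter L).items.filter (fun p => decide (p.2 ≥ 2))).map (fun p => p.1))
      = (PySem.Set.ofList L).filter (fun v => decide (2 ≤ L.count v)) := by
  rw [PySem.Dict.items_counter, List.filter_map, List.map_map]
  simp only [Function.comp_def]
  simp only [List.map_id']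
  apply List.filter_congr
  intro x _
  simp [ge_iff_le]

-- min_positive_fret's loop builds the positive parsed values
theorem pv_min_positive_vals (frets : String) :
    (frets.toList.foldl
      (fun acc ch =>
        if ch = 'x' then acc
        else
          let n := pvHexVal ch
          if n > 0 then acc ++ [n] else acc) ([] : List Int))
    = ((frets.toList.filter (fun ch => !(ch == 'x'))).map pvHexVal).filter (fun v => decide (0 < v)) := by
  induction frets.toList using List.reverseRecOn with
  | nil => simp
  | append_singleton t c ih =>
    rw [List.foldl_append, List.foldl_cons, List.foldl_nil, ih]
    by_cases hc : c = 'x'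
    · simp [hc]
    · by_cases hn : 0 < pvHexVal c
      · simp [hc, hn, List.filter_append]
      · simp [hc, hn, List.filter_append]

-- core equivalence on the parsed list of values
theorem pv_core (L : List Int) :
    (if L = [] then none
     else
       let dups := (PySem.Set.ofList L).filter (fun v => decide (2 ≤ L.count v))
       if dups = [] then
         (if L.filter (fun v => decide (0 < v)) = [] then none
          else PySem.List.min? (L.filter (fun v => decide (0 < v))) (fun v => v))
       else PySem.List.min? dups (fun v => v))
    = (if PySem.List.sorted L (fun v => v) false = [] then none
       else
         match pvFirstAdjDup (PySem.List.sorted L (fun v => v) false) with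
         | some d => some d
         | none => pvFirstPos (PySem.List.sorted L (fun v => v) false)) := by
  set S := PySem.List.sorted L (fun v => v) false with hS
  have hperm : S.Perm L := PySem.List.sorted_perm L (fun v => v) false
  have hp : S.Pairwise (· ≤ ·) := by
    simpa using PySem.List.sorted_pairwise L (fun v => v)
  by_cases hnil : L = []
  · simp [hnil, hS, PySem.List.sorted]
  · have hSnil : ¬ S = [] := by
      intro h; exact hnil (by simpa [h] using hperm.symm)
    rw [if_neg hnil, if_neg hSnil]
    have hcount : ∀ v : Int, S.count v = L.count v := fun v => hperm.count_eq v
    cases hfd : pvFirstAdjDup S with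
    | none =>
      -- no duplicates
      have hnd : S.Nodup := (pv_firstAdjDup_none hp).mp hfd
      have hdups : (PySem.Set.ofList L).filter (fun v => decide (2 ≤ L.count v)) = [] := by
        rw [List.filter_eq_nil_iff]
        intro v hv
        have : L.count v ≤ 1 := by
          rw [← hcount]; exact List.nodup_iff_count_le_one.mp hnd v
        simp; omega
      rw [hdups, if_pos rfl]
      have hpos : pvFirstPos S = PySem.List.min? (S.filter (fun v => decide (0 < v))) (fun v => v) :=
        pv_firstPos_eq hp
      have hpf : (S.filter (fun v => decide (0 < v))).Perm (L.filter (fun v => decide (0 < v))) :=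
        hperm.filter _
      by_cases hfe : L.filter (fun v => decide (0 < v)) = []
      · have : S.filter (fun v => decide (0 < v)) = [] := by
          have := hpf; rw [hfe] at this; exact List.Perm.eq_nil this
        simp [hfe, hpos, this, PySem.List.min?]
      · rw [if_neg hfe, hpos, pv_min?_id_eq_of_perm hpf]
    | some d =>
      obtain ⟨hc2, hmin⟩ := pv_firstAdjDup_some hp hfd
      rw [hcount] at hc2
      have hmin' : ∀ v : Int, 2 ≤ L.count v → d ≤ v := fun v hv => hmin v (by rw [hcount]; exact hv)
      have hdmem : d ∈ L := List.count_pos_iff.mp (by omega)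
      have hdups_ne : ¬ ((PySem.Set.ofList L).filter (fun v => decide (2 ≤ L.count v)) = []) := by
        intro h
        rw [List.filter_eq_nil_iff] at h
        exact (h d (by rw [PySem.Set.mem_ofList]; exact hdmem)) (by simp; omega)
      rw [if_neg hdups_ne]
      have : PySem.List.min? ((PySem.Set.ofList L).filter (fun v => decide (2 ≤ L.count v))) (fun v => v) = some d := by
        apply pv_min?_id_of_isMin
        · rw [List.mem_filter, PySem.Set.mem_ofList]
          exact ⟨hdmem, by simp; omega⟩
        · intro y hy
          rw [List.mem_filter] at hy
          have : 2 ≤ L.count y := by have := hy.2; simpa using this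
          exact hmin' y this
      rw [this]

-- ===== VERDICT (by name: the statement is the Claim_ definition above) =====
theorem barre_fret_for_chart_spec : Claim_equal_barre_fret_for_chart := by
  intro frets _ _
  unfold Spec_barre_fret_for_chart barre_fret_for_chart barre_fret_for_chart_alt pv_min_positive_fret
  simp only [pv_dups_eq, pv_min_positive_vals]
  exact pv_core ((frets.toList.filter (fun ch => !(ch == 'x'))).map pvHexVal)
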